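-- pv_equiv track=rewrite | github.com/iSemantics-ai/Finance-SC-Relations | src/relation_extraction/preprocessing_funcs.py | get_e1e2_start
-- ===== SOURCE A (Python) =====
-- def get_e1e2_start(x, e1_id, e2_id):
--     try:
--         e1_e2_start = (
--             [i for i, e in enumerate(x) if e == e1_id][0],
--             [i for i, e in enumerate(x) if e == e2_id][0],
--         )
--     except Exception as e:
--         e1_e2_start = None
--     return e1_e2_start
-- ===== SOURCE B (Python) =====
-- def get_e1e2_start(x, e1_id, e2_id):
--     try:
--         i1 = None
--         i2 = None
--         for i, e in enumerate(x):
--             if i1 is None and e == e1_id: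
--                 i1 = i
--             if i2 is None and e == e2_id:
--                 i2 = i
--         if i1 is None or i2 is None:
--             return None
--         return (i1, i2)
--     except Exception:
--         return None
-- ===== Notes on version B (the rewrite author's own statement) =====
-- stated objective: alternative
-- what changed: Replaces two full list-comprehension scans (one per token id) with a single pass over enumerate(x) that records the first index of each id in two slots.
import Mathlib
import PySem

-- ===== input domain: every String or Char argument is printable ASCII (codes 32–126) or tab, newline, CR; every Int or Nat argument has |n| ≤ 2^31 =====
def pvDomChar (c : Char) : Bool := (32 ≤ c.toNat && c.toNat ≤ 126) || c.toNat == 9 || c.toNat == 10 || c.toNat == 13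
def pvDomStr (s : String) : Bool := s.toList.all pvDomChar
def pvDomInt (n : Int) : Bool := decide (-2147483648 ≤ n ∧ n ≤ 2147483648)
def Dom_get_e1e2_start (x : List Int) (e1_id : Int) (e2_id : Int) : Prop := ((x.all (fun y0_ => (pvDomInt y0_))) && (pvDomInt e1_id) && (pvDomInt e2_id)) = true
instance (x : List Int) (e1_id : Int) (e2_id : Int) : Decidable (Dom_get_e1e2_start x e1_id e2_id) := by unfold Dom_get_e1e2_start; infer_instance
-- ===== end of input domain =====

-- B replaces A's two list-comprehension scans with one pass over enumerate(x) keeping two first-index slots (objective: alternative).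
-- ===== PORT A =====
-- '[i for i, e in enumerate(x) if e == t][0]' : head? of the comprehension list; none = IndexError, caught by A's except -> None
def pvIdxList (x : List Int) (t : Int) : List Int :=
  ((PySem.List.enumerate x 0).filter (fun p => p.2 == t)).map (fun p => p.1)

def get_e1e2_start (x : List Int) (e1_id : Int) (e2_id : Int) : Option (Int × Int) :=
  match (pvIdxList x e1_id).head?, (pvIdxList x e2_id).head? with
  | some a, some b => some (a, b)
  | _, _ => none

-- ===== PORT B =====
-- the single for-loop of Source B: two slots i1, i2, set on first match, never overwritten
def pvAltLoop (e1_id e2_id : Int) : List (Int × Int) → Option Int → Option Int → Option Int × Option Int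
  | [], i1, i2 => (i1, i2)
  | (i, e) :: rest, i1, i2 =>
      pvAltLoop e1_id e2_id rest
        (if i1 = none ∧ e = e1_id then some i else i1)
        (if i2 = none ∧ e = e2_id then some i else i2)

def get_e1e2_start_alt (x : List Int) (e1_id : Int) (e2_id : Int) : Option (Int × Int) :=
  -- 'if i1 is None or i2 is None: return None; return (i1, i2)' as Option combinators
  let r := pvAltLoop e1_id e2_id (PySem.List.enumerate x 0) none none
  r.1.bind (fun a => r.2.map (fun b => (a, b)))

-- ===== PRECONDITION & SPEC =====
def Spec_get_e1e2_start (x : List Int) (e1_id : Int) (e2_id : Int) (out : Option (Int × Int)) : Prop := out = get_e1e2_start_alt x e1_id e2_id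
instance (x : List Int) (e1_id : Int) (e2_id : Int) (out : Option (Int × Int)) : Decidable (Spec_get_e1e2_start x e1_id e2_id out) := by unfold Spec_get_e1e2_start; infer_instance

-- ===== CLAIM (what is proved, stated in full; the proofs are below) =====
def Claim_equal_get_e1e2_start : Prop := ∀ (x : List Int) (e1_id : Int) (e2_id : Int), Dom_get_e1e2_start x e1_id e2_id → Spec_get_e1e2_start x e1_id e2_id (get_e1e2_start x e1_id e2_id)

-- ===== LEMMAS AND PROOFS =====
theorem pvFirst_cons (i e t : Int) (rest : List (Int × Int)) :
    ((((i, e) :: rest).filter (fun p => p.2 == t)).map (fun p => p.1)).head? =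
      if e = t then some i else ((rest.filter (fun p => p.2 == t)).map (fun p => p.1)).head? := by
  by_cases h : e = t
  · simp [List.filter, h]
  · simp [List.filter_cons, h]

theorem pvAltLoop_eq (e1_id e2_id : Int) (l : List (Int × Int)) (i1 i2 : Option Int) :
    pvAltLoop e1_id e2_id l i1 i2 =
      (i1.or (((l.filter (fun p => p.2 == e1_id)).map (fun p => p.1)).head?),
       i2.or (((l.filter (fun p => p.2 == e2_id)).map (fun p => p.1)).head?)) := by
  induction l generalizing i1 i2 with
  | nil => cases i1 <;> cases i2 <;> simp [pvAltLoop]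
  | cons p rest ih =>
    obtain ⟨i, e⟩ := p
    rw [pvAltLoop, ih, pvFirst_cons, pvFirst_cons]
    cases i1 <;> cases i2 <;> by_cases h1 : e = e1_id <;> by_cases h2 : e = e2_id <;>
      simp [h1, h2] <;> split_ifs <;> simp

-- ===== VERDICT (by name: the statement is the Claim_ definition above) =====
theorem get_e1e2_start_spec : Claim_equal_get_e1e2_start := by
  intro x e1_id e2_id _
  unfold Spec_get_e1e2_start get_e1e2_start get_e1e2_start_alt pvIdxList
  rw [pvAltLoop_eq]
  cases (((PySem.List.enumerate x 0).filter (fun p => p.2 == e1_id)).map (fun p => p.1)).head? <;>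
  cases (((PySem.List.enumerate x 0).filter (fun p => p.2 == e2_id)).map (fun p => p.1)).head? <;>
    simp
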